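-- pv_equiv track=rewrite | github.com/wahchachaps/CPCT-Dashboard | app.py | find_edd_sheet
-- ===== SOURCE A (Python) =====
-- def find_edd_sheet(sheet_names):
--     for name in sheet_names:
--         lower = name.lower()
--         if lower.startswith("edd"):
--             return name
--     for name in sheet_names:
--         lower = name.lower()
--         if "edd" in lower:
--             return name
--     return None
-- ===== SOURCE B (Python) =====
-- def find_edd_sheet(sheet_names):
--     fallback = None
--     for name in sheet_names:
--         lower = name.lower()
--         if lower.startswith("edd"):
--             return name
--         if fallback is None and "edd" in lower:
--             fallback = name
--     return fallback
-- ===== Notes on version B (the rewrite author's own statement) =====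
-- stated objective: simpler
-- what changed: Replaces A's two sequential scans (prefix pass, then substring pass) with a single pass that returns a prefix match immediately and memoizes the first substring match as a fallback.
import Mathlib
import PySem

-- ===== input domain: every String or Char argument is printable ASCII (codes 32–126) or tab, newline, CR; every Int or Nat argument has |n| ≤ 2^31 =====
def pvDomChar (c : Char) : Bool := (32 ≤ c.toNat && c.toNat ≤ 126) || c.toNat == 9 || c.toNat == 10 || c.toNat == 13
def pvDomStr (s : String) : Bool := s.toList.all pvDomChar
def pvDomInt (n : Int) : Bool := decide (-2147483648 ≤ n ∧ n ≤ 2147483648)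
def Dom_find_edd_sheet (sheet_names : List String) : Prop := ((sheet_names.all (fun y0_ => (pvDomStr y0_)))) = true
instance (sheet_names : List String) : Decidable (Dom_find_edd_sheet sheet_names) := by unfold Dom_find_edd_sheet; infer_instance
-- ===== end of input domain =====

-- B merges A's two sequential scans into one pass that memoizes the first substring match as a fallback (objective: simpler).


-- ===== PORT A =====
-- first loop of A: return the first name whose lower() starts with "edd"
def pvPrefixScan : List String → Option String
  | [] => none
  | name :: rest =>
    if PySem.Str.startswith (PySem.Str.lower name) "edd" then some name
    else pvPrefixScan rest

-- second loop of A: return the first name whose lower() contains "edd"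
def pvSubScan : List String → Option String
  | [] => none
  | name :: rest =>
    if PySem.Str.isIn "edd" (PySem.Str.lower name) then some name
    else pvSubScan rest

def find_edd_sheet (sheet_names : List String) : Option String :=
  match pvPrefixScan sheet_names with
  | some name => some name
  | none => pvSubScan sheet_names

-- ===== PORT B =====
-- single loop with memoized fallback
def pvLoopB : List String → Option String → Option String
  | [], fallback => fallback
  | name :: rest, fallback =>
    let lower := PySem.Str.lower name
    if PySem.Str.startswith lower "edd" then some name
    else pvLoopB rest
      (if fallback.isNone && PySem.Str.isIn "edd" lower then some name else fallback)

def find_edd_sheet_alt (sheet_names : List String) : Option String :=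
  pvLoopB sheet_names none

-- ===== PRECONDITION & SPEC =====
def Spec_find_edd_sheet (sheet_names : List String) (out : Option String) : Prop := out = find_edd_sheet_alt sheet_names
instance (sheet_names : List String) (out : Option String) : Decidable (Spec_find_edd_sheet sheet_names out) := by unfold Spec_find_edd_sheet; infer_instance

-- ===== CLAIM (what is proved, stated in full; the proofs are below) =====
def Claim_equal_find_edd_sheet : Prop := ∀ (sheet_names : List String), Dom_find_edd_sheet sheet_names → Spec_find_edd_sheet sheet_names (find_edd_sheet sheet_names)

-- ===== LEMMAS AND PROOFS =====
-- B's loop, with pending fallback fb, equals: a prefix hit wins; otherwise fb if set; otherwise A's substring scan.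
theorem pvLoopB_eq (xs : List String) (fb : Option String) :
    pvLoopB xs fb =
      match pvPrefixScan xs, fb with
      | some n, _ => some n
      | none, some f => some f
      | none, none => pvSubScan xs := by
  induction xs generalizing fb with
  | nil => cases fb <;> simp [pvLoopB, pvPrefixScan, pvSubScan]
  | cons name rest ih =>
    simp only [pvLoopB, pvPrefixScan, pvSubScan, ih]
    by_cases hp : PySem.Chars.startswith (PySem.Chars.lower name.toList) ['e','d','d'] = true
    · simp [hp]
    · by_cases hs : PySem.Chars.isIn ['e','d','d'] (PySem.Chars.lower name.toList) = true <;>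
        cases fb <;> cases hpre : pvPrefixScan rest <;> simp [hp, hs, hpre]

-- ===== VERDICT (by name: the statement is the Claim_ definition above) =====
theorem find_edd_sheet_spec : Claim_equal_find_edd_sheet := by
  intro xs _
  unfold Spec_find_edd_sheet find_edd_sheet find_edd_sheet_alt
  rw [pvLoopB_eq]
  cases pvPrefixScan xs <;> rfl
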